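-- pv_equiv track=rewrite | github.com/zedzijc/advent_2018 | Day_12/Advent_12a.py | get_plant_sum
-- ===== SOURCE A (Python) =====
-- class PotUtils(object):
--     growth_patterns = [".##..", "#####", "####.", ".##.#",
--                        "...##", ".#.##", "#..#.", "#.#..",
--                        ".###.", "##.##", ".#...", "###..",
--                        ".#..#", "##...", "..#..", "#.#.#", ".#.#."]
--
--     @classmethod
--     def get_pot_contents_next_generation(cls, sequence):
--         return "#" if sequence in cls.growth_patterns else "."
--
-- class Pot(object):
--
--     def __init__(self, content, pot_points):
--         self.content = content
--         self.points = pot_points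
--         self.next_generation_content = "."
--
--     def get_content(self):
--         return self.content
--
--     def get_points(self):
--         return self.points
--
--     def set_next_generation_content(self, next_generation_content):
--         self.next_generation_content = next_generation_content
--
--     def age_one_generation(self):
--         self.content = self.next_generation_content
--
--     def __repr__(self):
--         return self.content
--
-- def add_margin_pots(pots, points, negative):
--     """
--     Adds empty pots on the edge of the list, either left or right end.
--     """
--     if negative:
--         index = 0
--         extra_points = -5
--         while index < 5:
--             pots.insert(index, Pot(".", points + extra_points))
--             index += 1
--             extra_points += 1
--     else:
--         extra_points = 1
--         while extra_points < 6:
--             pots.append(Pot(".", points + extra_points))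
--             extra_points += 1
--
-- def get_plant_sum(initial_state, generations):
--     pots = []
--     points = 0
--     add_margin_pots(pots, points, True)
--
--     for plant in list(initial_state):
--         pots.append(Pot(plant, points))
--         points += 1
--
--     # points - 1 because we add a point on the last for loop iteration above
--     add_margin_pots(pots, points - 1, False)
--     generation = 1
--     neighbour_width = 2
--     while generation <= generations:
--         index = neighbour_width
--
--         # Check what next generation will be for each pot
--         while index < len(pots) - neighbour_width:
--             pot_sequence = (pots[index - 2].get_content() +
--                             pots[index - 1].get_content() +
--                             pots[index].get_content() +
--                             pots[index + 1].get_content() +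
--                             pots[index + 2].get_content())
--             pots[index].set_next_generation_content(
--                 PotUtils.get_pot_contents_next_generation(pot_sequence))
--             index += 1
--
--         # Grow all pots to the next generation.
--         for pot in pots:
--             pot.age_one_generation()
--         add_margin_pots(pots, pots[0].get_points(), True)
--         add_margin_pots(pots, pots[-1].get_points(), False)
--         generation += 1
--
--     total_points = 0
--     for pot in pots:
--         if pot.get_content() == "#":
--             total_points += pot.get_points()
--     return total_points
-- ===== SOURCE B (Python) =====
-- GROWTH_PATTERNS = frozenset([
--     ".##..", "#####", "####.", ".##.#",
--     "...##", ".#.##", "#..#.", "#.#..",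
--     ".###.", "##.##", ".#...", "###..",
--     ".#..#", "##...", "..#..", "#.#.#", ".#.#."])
--
-- def get_plant_sum(initial_state, generations):
--     # sparse state: index -> character, only non-'.' cells are stored
--     state = {i: c for i, c in enumerate(initial_state) if c != '.'}
--     g = 0
--     while g < generations:
--         new_state = {}
--         if state:
--             lo = min(state) - 2
--             hi = max(state) + 2
--             for i in range(lo, hi + 1):
--                 window = ''.join(state.get(j, '.') for j in range(i - 2, i + 3))
--                 if window in GROWTH_PATTERNS:
--                     new_state[i] = '#'
--         state = new_state
--         g += 1
--     return sum(i for i, c in state.items() if c == '#')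
-- ===== Notes on version B (the rewrite author's own statement) =====
-- stated objective: faster
-- what changed: B replaces A's mutable padded list of Pot objects (10 margin pots re-added every generation, an index-scanned next_generation field, then a full aging pass over the whole ever-growing list) by a sparse dict of non-'.' cells keyed by pot index: each generation it rebuilds the dict only over the live extent min-2..max+2 from 5-char windows of dict lookups, and returns the sum of keys holding '#'.
import Mathlib
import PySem

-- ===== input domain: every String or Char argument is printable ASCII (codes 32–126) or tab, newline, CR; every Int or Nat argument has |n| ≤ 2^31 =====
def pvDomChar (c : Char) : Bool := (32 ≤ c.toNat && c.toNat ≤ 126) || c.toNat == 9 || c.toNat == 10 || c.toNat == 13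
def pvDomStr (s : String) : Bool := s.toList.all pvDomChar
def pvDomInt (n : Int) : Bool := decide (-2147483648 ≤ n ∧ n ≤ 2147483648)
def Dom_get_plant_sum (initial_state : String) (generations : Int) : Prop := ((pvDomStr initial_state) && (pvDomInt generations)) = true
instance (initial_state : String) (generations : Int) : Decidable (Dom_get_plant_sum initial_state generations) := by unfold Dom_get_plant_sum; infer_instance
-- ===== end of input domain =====

-- B replaces A's padded list of Pot objects by a sparse dict of the non-'.' cells, rebuilt each
-- generation over the live extent ±2 only (objective: faster, measured).


-- ===== PORT A =====

structure APot where
  content : Char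
  points  : Int
  nextGen : Char
deriving Repr, DecidableEq

def dfltPot : APot := ⟨'.', 0, '.'⟩

-- PotUtils.growth_patterns (contents are single characters, so sequences are 5-char lists)
def growthPatterns : List (List Char) :=
  [".##..".toList, "#####".toList, "####.".toList, ".##.#".toList,
   "...##".toList, ".#.##".toList, "#..#.".toList, "#.#..".toList,
   ".###.".toList, "##.##".toList, ".#...".toList, "###..".toList,
   ".#..#".toList, "##...".toList, "..#..".toList, "#.#.#".toList, ".#.#.".toList]

-- PotUtils.get_pot_contents_next_generation
def nextContent (sequence : List Char) : Char :=
  if sequence ∈ growthPatterns then '#' else '.'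

-- add_margin_pots (returns the mutated list)
def addMarginPots (pots : List APot) (points : Int) (negative : Bool) : List APot :=
  if negative then
    (PySem.List.pyRange 0 5 1).foldl
      (fun ps idx => PySem.List.insert ps idx ⟨'.', points + (-5 + idx), '.'⟩) pots
  else
    (PySem.List.pyRange 1 6 1).foldl
      (fun ps e => ps ++ [⟨'.', points + e, '.'⟩]) pots

-- pots[index-2].get_content() + … + pots[index+2].get_content()
def potWindow (ps : List APot) (i : Int) : List Char :=
  [(PySem.List.pyGetD ps (i-2) dfltPot).content,
   (PySem.List.pyGetD ps (i-1) dfltPot).content,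
   (PySem.List.pyGetD ps i dfltPot).content,
   (PySem.List.pyGetD ps (i+1) dfltPot).content,
   (PySem.List.pyGetD ps (i+2) dfltPot).content]

-- the inner while loop: set next_generation_content for index in [2, len-2)
def setNextLoop (pots : List APot) : List APot :=
  (PySem.List.pyRange 2 (PySem.List.len pots - 2) 1).foldl
    (fun ps i =>
      PySem.List.pySetD ps i
        { PySem.List.pyGetD ps i dfltPot with nextGen := nextContent (potWindow ps i) }) pots

-- one iteration of the outer while loop
def genStep (pots : List APot) : List APot :=
  let ps1 := setNextLoop pots
  let ps2 := ps1.map (fun p => { p with content := p.nextGen })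
  let ps3 := addMarginPots ps2 (PySem.List.pyGetD ps2 0 dfltPot).points true
  addMarginPots ps3 (PySem.List.pyGetD ps3 (-1) dfltPot).points false

def aLoop : Nat → List APot → List APot
  | 0, pots => pots
  | n+1, pots => aLoop n (genStep pots)

def get_plant_sum (initial_state : String) (generations : Int) : Int :=
  let pots0 := addMarginPots [] 0 true
  let st := initial_state.toList.foldl
    (fun (st : List APot × Int) c => (st.1 ++ [⟨c, st.2, '.'⟩], st.2 + 1)) (pots0, 0)
  let pots1 := addMarginPots st.1 (st.2 - 1) false
  let pots2 := aLoop generations.toNat pots1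
  pots2.foldl (fun acc p => if p.content = '#' then acc + p.points else acc) 0

-- ===== PORT B =====

def growthSetB : PySem.Set (List Char) :=
  PySem.Set.ofList
    [".##..".toList, "#####".toList, "####.".toList, ".##.#".toList,
     "...##".toList, ".#.##".toList, "#..#.".toList, "#.#..".toList,
     ".###.".toList, "##.##".toList, ".#...".toList, "###..".toList,
     ".#..#".toList, "##...".toList, "..#..".toList, "#.#.#".toList, ".#.#.".toList]

-- window = ''.join(state.get(j, '.') for j in range(i-2, i+3))
def bWindow (d : PySem.Dict Int Char) (i : Int) : List Char :=
  (PySem.List.pyRange (i-2) (i+3) 1).map (fun j => d.getD j '.')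

-- one iteration of B's while loop
def bStep (d : PySem.Dict Int Char) : PySem.Dict Int Char :=
  if d.items = [] then PySem.Dict.empty
  else
    let lo := (PySem.List.min? d.keys (fun x => x)).getD 0 - 2
    let hi := (PySem.List.max? d.keys (fun x => x)).getD 0 + 2
    (PySem.List.pyRange lo (hi + 1) 1).foldl
      (fun nd i => if bWindow d i ∈ growthSetB then nd.insert i '#' else nd)
      PySem.Dict.empty

def bLoop : Nat → PySem.Dict Int Char → PySem.Dict Int Char
  | 0, d => d
  | n+1, d => bLoop n (bStep d)

def get_plant_sum_alt (initial_state : String) (generations : Int) : Int :=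
  let d0 := (PySem.List.enumerate initial_state.toList 0).foldl
    (fun d p => if p.2 ≠ '.' then d.insert p.1 p.2 else d) PySem.Dict.empty
  let d := bLoop generations.toNat d0
  ((d.items.filter (fun p => p.2 = '#')).map (fun p => p.1)).sum

-- ===== PRECONDITION & SPEC =====
def Spec_get_plant_sum (initial_state : String) (generations : Int) (out : Int) : Prop := out = get_plant_sum_alt initial_state generations
instance (initial_state : String) (generations : Int) (out : Int) : Decidable (Spec_get_plant_sum initial_state generations out) := by unfold Spec_get_plant_sum; infer_instance

-- ===== CLAIM (what is proved, stated in full; the proofs are below) =====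
def Claim_equal_get_plant_sum : Prop := ∀ (initial_state : String) (generations : Int), Dom_get_plant_sum initial_state generations → Spec_get_plant_sum initial_state generations (get_plant_sum initial_state generations)

-- ===== LEMMAS AND PROOFS =====

-- margin closed forms
def marginL (p : Int) : List APot :=
  [⟨'.', p-5, '.'⟩, ⟨'.', p-4, '.'⟩, ⟨'.', p-3, '.'⟩, ⟨'.', p-2, '.'⟩, ⟨'.', p-1, '.'⟩]
def marginR (p : Int) : List APot :=
  [⟨'.', p+1, '.'⟩, ⟨'.', p+2, '.'⟩, ⟨'.', p+3, '.'⟩, ⟨'.', p+4, '.'⟩, ⟨'.', p+5, '.'⟩]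

theorem addMargin_neg_eq (ps : List APot) (p : Int) :
    addMarginPots ps p true = marginL p ++ ps := by
  have h : PySem.List.pyRange 0 5 1 = [0,1,2,3,4] := by decide
  simp only [addMarginPots, h, List.foldl]
  rw [PySem.List.insert_zero]
  rw [PySem.List.insert_ofNat _ 1 _ (by simp)]
  rw [PySem.List.insert_ofNat _ 2 _ (by simp)]
  rw [PySem.List.insert_ofNat _ 3 _ (by simp)]
  rw [PySem.List.insert_ofNat _ 4 _ (by simp)]
  simp [marginL]
  omega

theorem addMargin_pos_eq (ps : List APot) (p : Int) :
    addMarginPots ps p false = ps ++ marginR p := by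
  have h : PySem.List.pyRange 1 6 1 = [1,2,3,4,5] := by decide
  simp [addMarginPots, h, List.foldl, marginR]

theorem bWindow_eq (d : PySem.Dict Int Char) (i : Int) :
    bWindow d i = [d.getD (i-2) '.', d.getD (i-1) '.', d.getD i '.', d.getD (i+1) '.', d.getD (i+2) '.'] := by
  have h : PySem.List.pyRange (i-2) (i+3) 1 = [i-2, i-1, i, i+1, i+2] := by
    rw [PySem.List.pyRange_one_cons (by omega), PySem.List.pyRange_one_cons (by omega),
        PySem.List.pyRange_one_cons (by omega), PySem.List.pyRange_one_cons (by omega),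
        PySem.List.pyRange_one_cons (by omega), PySem.List.pyRange_one_eq_nil (by omega)]
    norm_num
    constructor <;> omega
  simp [bWindow, h]

theorem mem_growthSetB (x : List Char) : x ∈ growthSetB ↔ x ∈ growthPatterns := by
  rw [growthSetB, PySem.Set.mem_ofList, growthPatterns]

theorem nextContent_dots : nextContent ['.', '.', '.', '.', '.'] = '.' := by decide

-- getD of the conditional-insert fold over a range
theorem getD_range_insert_if (C : Int → Prop) [DecidablePred C] :
    ∀ (m : Nat) (a j : Int) (d0 : PySem.Dict Int Char),
    ((PySem.List.pyRange a (a + m) 1).foldl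
        (fun nd i => if C i then nd.insert i '#' else nd) d0).getD j '.' =
      if a ≤ j ∧ j < a + m ∧ C j then '#' else d0.getD j '.' := by
  intro m
  induction m with
  | zero =>
    intro a j d0
    rw [show ((a : Int) + ((0:Nat) : Int)) = a by simp]
    rw [PySem.List.pyRange_one_eq_nil (by omega)]
    simp only [List.foldl_nil]
    rw [if_neg (by omega)]
  | succ m ih =>
    intro a j d0
    rw [show ((a : Int) + ((m+1:Nat) : Int)) = a + 1 + (m : Nat) by push_cast; ring]
    rw [PySem.List.pyRange_one_cons (by omega)]
    simp only [List.foldl_cons]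
    rw [ih (a+1) j _]
    have hm : ((m:Int)) ≥ 0 := by positivity
    by_cases hC : C a
    · simp only [hC, if_true]
      rw [PySem.Dict.getD_insert]
      by_cases hj : j = a
      · subst hj
        rw [if_neg (by omega), if_pos rfl, if_pos ⟨le_refl _, by omega, hC⟩]
      · rw [if_neg hj]
        by_cases h1 : a + 1 ≤ j ∧ j < a + 1 + (m:Int) ∧ C j
        · rw [if_pos h1, if_pos ⟨by omega, h1.2⟩]
        · rw [if_neg h1, if_neg ?_]
          rintro ⟨x1, x2, x3⟩
          exact h1 ⟨by omega, x2, x3⟩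
    · simp only [hC, if_false]
      by_cases h1 : a + 1 ≤ j ∧ j < a + 1 + (m:Int) ∧ C j
      · rw [if_pos h1, if_pos ⟨by omega, h1.2⟩]
      · rw [if_neg h1, if_neg ?_]
        rintro ⟨x1, x2, x3⟩
        rcases eq_or_lt_of_le x1 with h | h
        · exact hC (h ▸ x3)
        · exact h1 ⟨by omega, x2, x3⟩

theorem getD_mem_keys {d : PySem.Dict Int Char} {k : Int} (h : d.getD k '.' ≠ '.') :
    k ∈ d.keys := by
  by_contra hmem
  have hc : d.contains k = false := by
    rw [PySem.Dict.contains_eq_decide_mem_keys]; simpa using hmem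
  exact h (PySem.Dict.getD_of_not_contains d '.' hc)

theorem empty_getD {d : PySem.Dict Int Char} (h : d.items = []) (k : Int) :
    d.getD k '.' = '.' := by
  cases d with
  | mk its => simp only at h; subst h; exact PySem.Dict.getD_empty _ _

theorem keys_ne_nil {d : PySem.Dict Int Char} (h : d.items ≠ []) : d.keys ≠ [] := by
  cases d with
  | mk its => cases its with
    | nil => exact absurd rfl h
    | cons p t => simp [PySem.Dict.keys]

theorem bStep_getD (d : PySem.Dict Int Char) (j : Int) :
    (bStep d).getD j '.' = nextContent (bWindow d j) := by
  rw [bStep]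
  by_cases hemp : d.items = []
  · rw [if_pos hemp, PySem.Dict.getD_empty]
    rw [bWindow_eq]
    simp only [empty_getD hemp]
    exact nextContent_dots.symm
  · rw [if_neg hemp]
    obtain ⟨m, hm⟩ : ∃ m, PySem.List.min? d.keys (fun x => x) = some m := by
      rcases Option.eq_none_or_eq_some (PySem.List.min? d.keys (fun x => x)) with h | ⟨m, h⟩
      · exact absurd ((PySem.List.min?_eq_none_iff _ _).mp h) (keys_ne_nil hemp)
      · exact ⟨m, h⟩
    obtain ⟨M, hM⟩ : ∃ M, PySem.List.max? d.keys (fun x => x) = some M := by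
      rcases Option.eq_none_or_eq_some (PySem.List.max? d.keys (fun x => x)) with h | ⟨M, h⟩
      · exact absurd ((PySem.List.max?_eq_none_iff _ _).mp h) (keys_ne_nil hemp)
      · exact ⟨M, h⟩
    have hmM : m ≤ M := PySem.List.min?_isMin hm M (PySem.List.max?_mem hM)
    have hkey_bound : ∀ k : Int, d.getD k '.' ≠ '.' → m ≤ k ∧ k ≤ M := fun k hk =>
      ⟨PySem.List.min?_isMin hm k (getD_mem_keys hk), PySem.List.max?_isMax hM k (getD_mem_keys hk)⟩
    simp only [hm, hM, Option.getD_some]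
    have hrange : M + 2 + 1 = (m - 2) + ((M + 2 + 1 - (m - 2)).toNat : Int) := by omega
    rw [hrange, getD_range_insert_if (fun i => bWindow d i ∈ growthSetB)]
    by_cases hin : m - 2 ≤ j ∧ j < m - 2 + ((M + 2 + 1 - (m - 2)).toNat : Int) ∧ bWindow d j ∈ growthSetB
    · rw [if_pos hin, nextContent, if_pos ((mem_growthSetB _).mp hin.2.2)]
    · rw [if_neg hin, PySem.Dict.getD_empty]
      by_cases hj : m - 2 ≤ j ∧ j ≤ M + 2
      · -- inside the scanned range: the window is not a growth pattern
        have hng : bWindow d j ∉ growthSetB := fun hg => hin ⟨hj.1, by omega, hg⟩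
        rw [nextContent, if_neg (fun hp => hng ((mem_growthSetB _).mpr hp))]
      · -- outside the scanned range: the window is all dots
        have hdots : ∀ t : Int, j - 2 ≤ t → t ≤ j + 2 → d.getD t '.' = '.' := by
          intro t h1 h2
          by_contra hne
          have := hkey_bound t hne
          omega
        rw [bWindow_eq]
        rw [hdots (j-2) (by omega) (by omega), hdots (j-1) (by omega) (by omega),
            hdots j (by omega) (by omega), hdots (j+1) (by omega) (by omega),
            hdots (j+2) (by omega) (by omega)]
        exact nextContent_dots.symm

theorem bStep_nodup (d : PySem.Dict Int Char) : (bStep d).keys.Nodup := by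
  rw [bStep]
  split
  · simp [PySem.Dict.empty, PySem.Dict.keys]
  · rw [PySem.List.foldl_ite_eq_foldl_filter]
    exact PySem.Dict.nodup_keys_foldl_insert _ (fun _ _ => '#') _ (by simp [PySem.Dict.empty, PySem.Dict.keys])


theorem potWindow_congr {ps pots : List APot} (hlen : ps.length = pots.length)
    (hcp : ∀ k : Nat, k < pots.length → (ps.getD k dfltPot).content = (pots.getD k dfltPot).content)
    {i : Int} (h2 : 2 ≤ i) (hi : i < (pots.length : Int) - 2) :
    potWindow ps i = potWindow pots i := by
  have key : ∀ t : Int, i - 2 ≤ t → t ≤ i + 2 →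
      (PySem.List.pyGetD ps t dfltPot).content = (PySem.List.pyGetD pots t dfltPot).content := by
    intro t h1 h2'
    have h0 : 0 ≤ t := by omega
    have hlt : t < (ps.length : Int) := by omega
    have hlt' : t < (pots.length : Int) := by omega
    rw [PySem.List.pyGetD_eq_getElem ps dfltPot h0 hlt, PySem.List.pyGetD_eq_getElem pots dfltPot h0 hlt']
    have hk : t.toNat < pots.length := by omega
    have := hcp t.toNat hk
    rwa [List.getD_eq_getElem ps dfltPot (by omega), List.getD_eq_getElem pots dfltPot hk] at this
  rw [potWindow, potWindow, key (i-2) (by omega) (by omega), key (i-1) (by omega) (by omega),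
      key i (by omega) (by omega), key (i+1) (by omega) (by omega), key (i+2) (by omega) (by omega)]

theorem apot_update_eq (p : APot) (w : Char) :
    ({ p with nextGen := w } : APot) = ⟨p.content, p.points, w⟩ := rfl

theorem setNextAux (pots : List APot) :
    ∀ (mfuel : Nat) (a : Int) (ps : List APot), 2 ≤ a →
    mfuel = ((pots.length : Int) - 2 - a).toNat →
    ps.length = pots.length →
    (∀ k : Nat, k < pots.length →
      (ps.getD k dfltPot).content = (pots.getD k dfltPot).content ∧
      (ps.getD k dfltPot).points = (pots.getD k dfltPot).points) →
    ((PySem.List.pyRange a ((pots.length : Int) - 2) 1).foldl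
        (fun ps i => PySem.List.pySetD ps i
          { PySem.List.pyGetD ps i dfltPot with nextGen := nextContent (potWindow ps i) }) ps).length
        = pots.length ∧
    ∀ k : Nat, k < pots.length →
      ((PySem.List.pyRange a ((pots.length : Int) - 2) 1).foldl
        (fun ps i => PySem.List.pySetD ps i
          { PySem.List.pyGetD ps i dfltPot with nextGen := nextContent (potWindow ps i) }) ps).getD k dfltPot
      = if a ≤ (k : Int) ∧ (k : Int) < (pots.length : Int) - 2
        then ⟨(pots.getD k dfltPot).content, (pots.getD k dfltPot).points,
              nextContent (potWindow pots (k : Int))⟩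
        else ps.getD k dfltPot := by
  intro mfuel
  induction mfuel with
  | zero =>
    intro a ps ha hfuel hlen hcp
    rw [PySem.List.pyRange_one_eq_nil (by omega)]
    simp only [List.foldl_nil]
    refine ⟨hlen, fun k hk => ?_⟩
    rw [if_neg (by omega)]
  | succ mfuel ih =>
    intro a ps ha hfuel hlen hcp
    have hab : a < (pots.length : Int) - 2 := by omega
    rw [PySem.List.pyRange_one_cons hab]
    simp only [List.foldl_cons]
    -- the updated list after processing index a
    set q : APot := { PySem.List.pyGetD ps a dfltPot with nextGen := nextContent (potWindow ps a) } with hq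
    set ps' : List APot := PySem.List.pySetD ps a q with hps'
    have hset : ps' = ps.set a.toNat q := by
      rw [hps', PySem.List.pySetD_of_nonneg ps q (by omega)]
    have hlen' : ps'.length = pots.length := by rw [hset, List.length_set, hlen]
    have hgetD' : ∀ k : Nat, k < pots.length →
        ps'.getD k dfltPot = if k = a.toNat then q else ps.getD k dfltPot := by
      intro k hk
      rw [hset, List.getD, List.getD, List.getElem?_set]
      by_cases hka : a.toNat = k
      · rw [if_pos hka, if_pos (by omega), if_pos hka.symm]; rfl
      · rw [if_neg hka, if_neg (fun h => hka h.symm)]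
    have hcp' : ∀ k : Nat, k < pots.length →
        (ps'.getD k dfltPot).content = (pots.getD k dfltPot).content ∧
        (ps'.getD k dfltPot).points = (pots.getD k dfltPot).points := by
      intro k hk
      rw [hgetD' k hk]
      by_cases hka : k = a.toNat
      · rw [if_pos hka]
        have hq2 : q.content = (ps.getD k dfltPot).content ∧ q.points = (ps.getD k dfltPot).points := by
          rw [hq, PySem.List.pyGetD_eq_getElem ps dfltPot (by omega) (by omega),
              List.getD_eq_getElem ps dfltPot (by omega)]
          constructor <;> simp [hka]
        exact ⟨hq2.1.trans (hcp k hk).1, hq2.2.trans (hcp k hk).2⟩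
      · rw [if_neg hka]; exact hcp k hk
    obtain ⟨rlen, rget⟩ := ih (a + 1) ps' (by omega) (by omega) hlen' hcp'
    refine ⟨rlen, fun k hk => ?_⟩
    rw [rget k hk]
    by_cases hka : (k : Int) = a
    · -- k = a: set in this step, untouched later
      rw [if_neg (by omega), if_pos ⟨by omega, by omega⟩, hgetD' k hk, if_pos (by omega)]
      rw [hq]
      have hwin : potWindow ps a = potWindow pots a :=
        potWindow_congr hlen (fun k hk => (hcp k hk).1) ha hab
      rw [← hka] at hwin ⊢
      rw [PySem.List.pyGetD_eq_getElem ps dfltPot (by omega) (by omega)]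
      have hcpk := hcp k hk
      rw [List.getD_eq_getElem ps dfltPot (by omega), List.getD_eq_getElem pots dfltPot hk] at hcpk
      rw [List.getD_eq_getElem pots dfltPot hk, apot_update_eq]
      simp only [Int.toNat_natCast] at *
      simp only [APot.mk.injEq]
      exact ⟨hcpk.1, hcpk.2, congrArg nextContent hwin⟩
    · by_cases hcond : a + 1 ≤ (k : Int) ∧ (k : Int) < (pots.length : Int) - 2
      · rw [if_pos hcond, if_pos ⟨by omega, hcond.2⟩]
      · rw [if_neg hcond, if_neg (by omega), hgetD' k hk, if_neg (by omega)]

def agePot (p : APot) : APot := { p with content := p.nextGen }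

theorem agePot_eq (p : APot) : agePot p = ⟨p.nextGen, p.points, p.nextGen⟩ := rfl

theorem getD_map_age (l : List APot) (k : Nat) (hk : k < l.length) :
    (l.map agePot).getD k dfltPot = agePot (l.getD k dfltPot) := by
  rw [List.getD_eq_getElem _ _ (by simpa using hk), List.getD_eq_getElem _ _ hk, List.getElem_map]

theorem getD_append_lt (u v : List APot) (k : Nat) (h : k < u.length) :
    (u ++ v).getD k dfltPot = u.getD k dfltPot := by
  rw [List.getD, List.getD, List.getElem?_append_left h]

theorem getD_append_ge (u v : List APot) (k : Nat) (h : u.length ≤ k) :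
    (u ++ v).getD k dfltPot = v.getD (k - u.length) dfltPot := by
  rw [List.getD, List.getD, List.getElem?_append_right h]

theorem marginL_getD (p : Int) (k : Nat) (h : k < 5) :
    (marginL p).getD k dfltPot = ⟨'.', p - 5 + k, '.'⟩ := by
  interval_cases k <;> simp [marginL, List.getD] <;> omega

theorem marginR_getD (p : Int) (k : Nat) (h : k < 5) :
    (marginR p).getD k dfltPot = ⟨'.', p + 1 + k, '.'⟩ := by
  interval_cases k <;> simp [marginR, List.getD] <;> omega

theorem window_dots (d : PySem.Dict Int Char) (i : Int)
    (h : ∀ t : Int, i - 2 ≤ t → t ≤ i + 2 → d.getD t '.' = '.') :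
    nextContent (bWindow d i) = '.' := by
  rw [bWindow_eq, h (i-2) (by omega) (by omega), h (i-1) (by omega) (by omega),
      h i (by omega) (by omega), h (i+1) (by omega) (by omega), h (i+2) (by omega) (by omega)]
  exact nextContent_dots

theorem window_not_dot {d : PySem.Dict Int Char} {i : Int}
    (h : nextContent (bWindow d i) ≠ '.') :
    ∃ t : Int, i - 2 ≤ t ∧ t ≤ i + 2 ∧ d.getD t '.' ≠ '.' := by
  by_contra hall
  exact h (window_dots d i (fun t ht1 ht2 => by
    by_contra hne
    exact hall ⟨t, ht1, ht2, hne⟩))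

def PlantInv (d : PySem.Dict Int Char) (b : Int) (pots : List APot) : Prop :=
  10 ≤ pots.length ∧
  (∀ k : Nat, k < pots.length →
    (pots.getD k dfltPot).points = b + k ∧
    (pots.getD k dfltPot).content = d.getD (b + k) '.') ∧
  (∀ k : Nat, k < pots.length → (k < 2 ∨ pots.length - 2 ≤ k) →
    (pots.getD k dfltPot).nextGen = '.') ∧
  (∀ i : Int, d.getD i '.' ≠ '.' → b + 4 ≤ i ∧ i ≤ b + (pots.length : Int) - 5) ∧
  d.keys.Nodup

theorem potWindow_eq_bWindow {d : PySem.Dict Int Char} {b : Int} {pots : List APot}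
    (hpt : ∀ k : Nat, k < pots.length →
      (pots.getD k dfltPot).points = b + k ∧
      (pots.getD k dfltPot).content = d.getD (b + k) '.')
    (j : Int) (h2 : 2 ≤ j) (hj : j < (pots.length : Int) - 2) :
    potWindow pots j = bWindow d (b + j) := by
  have key : ∀ t : Int, j - 2 ≤ t → t ≤ j + 2 →
      (PySem.List.pyGetD pots t dfltPot).content = d.getD (b + t) '.' := by
    intro t ht1 ht2
    have h0 : 0 ≤ t := by omega
    have hlt : t < (pots.length : Int) := by omega
    rw [PySem.List.pyGetD_eq_getElem pots dfltPot h0 hlt]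
    have hk : t.toNat < pots.length := by omega
    have := (hpt t.toNat hk).2
    rw [List.getD_eq_getElem pots dfltPot hk] at this
    rw [this]
    congr 1
    omega
  rw [potWindow, bWindow_eq, key (j-2) (by omega) (by omega), key (j-1) (by omega) (by omega),
      key j (by omega) (by omega), key (j+1) (by omega) (by omega), key (j+2) (by omega) (by omega),
      show b + j - 2 = b + (j - 2) by ring, show b + j - 1 = b + (j - 1) by ring,
      show b + j + 1 = b + (j + 1) by ring, show b + j + 2 = b + (j + 2) by ring]

theorem genStep_inv {d : PySem.Dict Int Char} {b : Int} {pots : List APot}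
    (h : PlantInv d b pots) : PlantInv (bStep d) (b - 5) (genStep pots) := by
  obtain ⟨h10, hpt, hng, hbd, -⟩ := h
  obtain ⟨rlen, rget⟩ := setNextAux pots ((pots.length : Int) - 2 - 2).toNat 2 pots (by omega)
      (by omega) rfl (fun k hk => ⟨rfl, rfl⟩)
  have hsn : setNextLoop pots = (PySem.List.pyRange 2 ((pots.length : Int) - 2) 1).foldl
      (fun ps i => PySem.List.pySetD ps i
        { PySem.List.pyGetD ps i dfltPot with nextGen := nextContent (potWindow ps i) }) pots := by
    rw [setNextLoop, PySem.List.len_eq]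
  set L := pots.length with hL
  set r := setNextLoop pots with hr
  have hrlen : r.length = L := by rw [hsn]; exact rlen
  set ps2 := r.map agePot with hps2
  have hps2len : ps2.length = L := by rw [hps2, List.length_map, hrlen]
  set N : Nat → Char := fun k =>
    if 2 ≤ (k : Int) ∧ (k : Int) < (L : Int) - 2
    then nextContent (potWindow pots (k : Int))
    else (pots.getD k dfltPot).nextGen with hN
  have hps2get : ∀ k : Nat, k < L → ps2.getD k dfltPot = ⟨N k, b + k, N k⟩ := by
    intro k hk
    rw [hps2, getD_map_age r k (by omega), hsn, rget k hk]
    by_cases hc : 2 ≤ (k : Int) ∧ (k : Int) < (L : Int) - 2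
    · rw [if_pos hc, hN]; simp only [if_pos hc, agePot_eq]
      rw [(hpt k hk).1]
    · rw [if_neg hc, hN]; simp only [if_neg hc, agePot_eq]
      rw [(hpt k hk).1]
  have hp0 : (PySem.List.pyGetD ps2 0 dfltPot).points = b := by
    rw [PySem.List.pyGetD_zero, hps2get 0 (by omega)]
    simp
  have hps3 : addMarginPots ps2 (PySem.List.pyGetD ps2 0 dfltPot).points true
      = marginL b ++ ps2 := by rw [addMargin_neg_eq, hp0]
  set ps3 : List APot := marginL b ++ ps2 with hps3def
  have hps3len : ps3.length = L + 5 := by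
    rw [hps3def, List.length_append, hps2len]
    have h5 : (marginL b).length = 5 := rfl
    omega
  have h5L : (marginL b).length = 5 := rfl
  have hlast : (PySem.List.pyGetD ps3 (-1) dfltPot).points = b + (L : Int) - 1 := by
    rw [PySem.List.pyGetD_neg_ofNat ps3 1 dfltPot (by omega) (by omega)]
    rw [← List.getD_eq_getElem ps3 dfltPot (by omega)]
    have hidx : ps3.length - 1 = 5 + (L - 1) := by omega
    rw [hidx, hps3def, getD_append_ge _ _ _ (by omega)]
    have hidx2 : 5 + (L - 1) - (marginL b).length = L - 1 := by omega
    rw [hidx2, hps2get (L - 1) (by omega)]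
    simp
    omega
  have hgen : genStep pots = ps3 ++ marginR (b + (L : Int) - 1) := by
    show addMarginPots
        (addMarginPots ((setNextLoop pots).map agePot)
          (PySem.List.pyGetD ((setNextLoop pots).map agePot) 0 dfltPot).points true)
        (PySem.List.pyGetD
          (addMarginPots ((setNextLoop pots).map agePot)
            (PySem.List.pyGetD ((setNextLoop pots).map agePot) 0 dfltPot).points true)
          (-1) dfltPot).points false
      = ps3 ++ marginR (b + (L : Int) - 1)
    rw [← hr, ← hps2, hps3, addMargin_pos_eq, hlast]
  -- dots facts from the live bound
  have hdotlow : ∀ i : Int, i ≤ b + 1 → nextContent (bWindow d i) = '.' := by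
    intro i hi
    refine window_dots d i (fun t ht1 ht2 => ?_)
    by_contra hne
    have := hbd t hne
    omega
  have hdothigh : ∀ i : Int, b + (L : Int) - 2 ≤ i → nextContent (bWindow d i) = '.' := by
    intro i hi
    refine window_dots d i (fun t ht1 ht2 => ?_)
    by_contra hne
    have := hbd t hne
    omega
  unfold PlantInv
  rw [hgen]
  have hfinlen : (ps3 ++ marginR (b + (L : Int) - 1)).length = L + 10 := by
    rw [List.length_append, hps3len]
    have h5 : (marginR (b + (L : Int) - 1)).length = 5 := rfl
    omega
  refine ⟨by omega, ?_, ?_, ?_, bStep_nodup d⟩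
  · intro k hk
    rw [hfinlen] at hk
    rw [bStep_getD]
    by_cases hk5 : k < 5
    · rw [getD_append_lt _ _ _ (by omega), hps3def,
          getD_append_lt _ _ _ (by simp [marginL]; omega), marginL_getD b k hk5]
      refine ⟨by simp, ?_⟩
      exact (hdotlow (b - 5 + (k : Int)) (by omega)).symm
    · by_cases hkL : k < L + 5
      · rw [getD_append_lt _ _ _ (by omega), hps3def,
            getD_append_ge _ _ _ (by simp [marginL]; omega)]
        have h5 : (marginL b).length = 5 := rfl
        rw [h5, hps2get (k - 5) (by omega)]
        refine ⟨by simp <;> omega, ?_⟩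
        show N (k - 5) = _
        simp only [hN]
        by_cases hmid : 2 ≤ ((k - 5 : Nat) : Int) ∧ ((k - 5 : Nat) : Int) < (L : Int) - 2
        · rw [if_pos hmid,
              potWindow_eq_bWindow hpt ((k - 5 : Nat) : Int) hmid.1 hmid.2]
          have : b + ((k - 5 : Nat) : Int) = b - 5 + (k : Int) := by omega
          rw [this]
        · rw [if_neg hmid, hng (k - 5) (by omega) (by omega)]
          rcases (by omega : k ≤ 6 ∨ L + 3 ≤ k) with hc | hc
          · exact (hdotlow (b - 5 + (k : Int)) (by omega)).symm
          · exact (hdothigh (b - 5 + (k : Int)) (by omega)).symm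
      · rw [getD_append_ge _ _ _ (by omega), hps3len,
            marginR_getD _ (k - (L + 5)) (by omega)]
        refine ⟨by simp <;> omega, ?_⟩
        exact (hdothigh (b - 5 + (k : Int)) (by omega)).symm
  · intro k hk hedge
    rw [hfinlen] at hk hedge
    rcases hedge with hlo | hhi
    · rw [getD_append_lt _ _ _ (by omega), hps3def,
          getD_append_lt _ _ _ (by simp [marginL]; omega), marginL_getD b k (by omega)]
    · rw [getD_append_ge _ _ _ (by omega), hps3len,
          marginR_getD _ (k - (L + 5)) (by omega)]
  · intro i hi
    rw [bStep_getD] at hi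
    obtain ⟨t, ht1, ht2, htne⟩ := window_not_dot hi
    have := hbd t htne
    rw [hfinlen]
    constructor <;> omega

theorem dInit_getD (cs : List Char) (i : Int) :
    ((PySem.List.enumerate cs 0).foldl
        (fun d p => if p.2 ≠ '.' then d.insert p.1 p.2 else d) PySem.Dict.empty).getD i '.'
      = if 0 ≤ i ∧ i < (cs.length : Int) then cs.getD i.toNat '.' else '.' := by
  induction cs using List.reverseRecOn with
  | nil => simp [PySem.List.enumerate_nil, PySem.Dict.getD_empty]
  | append_singleton xs x ih =>
    have hlen : ((xs ++ [x]).length : Int) = (xs.length : Int) + 1 := by simp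
    rw [PySem.List.enumerate_append, PySem.List.enumerate_cons, PySem.List.enumerate_nil,
        List.foldl_append]
    simp only [List.foldl_cons, List.foldl_nil]
    by_cases hx : x ≠ '.'
    · rw [if_pos hx, PySem.Dict.getD_insert]
      by_cases hi : i = 0 + (xs.length : Int)
      · rw [if_pos hi, if_pos (by omega), hi]
        have h0 : ((0 + (xs.length : Int))).toNat = xs.length := by omega
        rw [h0, List.getD_append_right xs [x] '.' xs.length (le_refl _)]
        simp
      · rw [if_neg hi, ih]
        by_cases hr : 0 ≤ i ∧ i < (xs.length : Int)
        · rw [if_pos hr, if_pos (by omega), List.getD_append xs [x] '.' i.toNat (by omega)]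
        · rw [if_neg hr, if_neg (by omega)]
    · rw [if_neg hx, ih]
      simp only [ne_eq, not_not] at hx
      by_cases hr : 0 ≤ i ∧ i < (xs.length : Int)
      · rw [if_pos hr, if_pos (by omega), List.getD_append xs [x] '.' i.toNat (by omega)]
      · by_cases hr2 : 0 ≤ i ∧ i < ((xs ++ [x]).length : Int)
        · rw [if_neg hr, if_pos hr2,
              List.getD_append_right xs [x] '.' i.toNat (by omega)]
          have h0 : i.toNat - xs.length = 0 := by omega
          rw [h0, hx]
          rfl
        · rw [if_neg hr, if_neg hr2]

theorem buildFold (cs : List Char) : ∀ (ps0 : List APot) (p0 : Int),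
    cs.foldl (fun (st : List APot × Int) c => (st.1 ++ [⟨c, st.2, '.'⟩], st.2 + 1)) (ps0, p0)
    = (ps0 ++ (PySem.List.enumerate cs p0).map (fun pr => ⟨pr.2, pr.1, '.'⟩),
       p0 + cs.length) := by
  induction cs with
  | nil => intro ps0 p0; simp [PySem.List.enumerate_nil]
  | cons c cs ih =>
    intro ps0 p0
    rw [List.foldl_cons, ih, PySem.List.enumerate_cons]
    simp only [List.map_cons, Prod.mk.injEq]
    constructor
    · simp
    · simp; ring

theorem init_inv (cs : List Char) :
    PlantInv
      ((PySem.List.enumerate cs 0).foldl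
        (fun d p => if p.2 ≠ '.' then d.insert p.1 p.2 else d) PySem.Dict.empty)
      (-5)
      (marginL 0 ++ (PySem.List.enumerate cs 0).map (fun pr => ⟨pr.2, pr.1, '.'⟩)
        ++ marginR (0 + (cs.length : Int) - 1)) := by
  set d0 := (PySem.List.enumerate cs 0).foldl
      (fun d p => if p.2 ≠ '.' then d.insert p.1 p.2 else d) PySem.Dict.empty with hd0
  set body := (PySem.List.enumerate cs 0).map
      (fun pr => (⟨pr.2, pr.1, '.'⟩ : APot)) with hbody
  have hblen : body.length = cs.length := by
    rw [hbody, List.length_map, PySem.List.length_enumerate]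
  have h5L : (marginL 0).length = 5 := rfl
  have h5R : (marginR (0 + (cs.length : Int) - 1)).length = 5 := rfl
  have hlen : (marginL 0 ++ body ++ marginR (0 + (cs.length : Int) - 1)).length
      = cs.length + 10 := by
    rw [List.length_append, List.length_append, h5L, h5R, hblen]; omega
  have hbget : ∀ j : Nat, j < cs.length →
      body.getD j dfltPot = ⟨cs.getD j '.', (j : Int), '.'⟩ := by
    intro j hj
    rw [hbody, List.getD_eq_getElem _ _ (by rw [List.length_map, PySem.List.length_enumerate]; exact hj),
        List.getElem_map, PySem.List.getElem_enumerate]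
    rw [List.getD_eq_getElem _ _ hj]
    simp
  unfold PlantInv
  refine ⟨by omega, ?_, ?_, ?_, ?_⟩
  · intro k hk
    rw [hlen] at hk
    rw [hd0, dInit_getD]
    by_cases hk5 : k < 5
    · rw [getD_append_lt _ _ _ (by rw [List.length_append, h5L]; omega),
          getD_append_lt _ _ _ (by omega), marginL_getD 0 k hk5]
      refine ⟨by simp <;> omega, ?_⟩
      rw [if_neg (by omega)]
    · by_cases hkn : k < cs.length + 5
      · rw [getD_append_lt _ _ _ (by rw [List.length_append, h5L]; omega),
            getD_append_ge _ _ _ (by omega), h5L, hbget (k - 5) (by omega)]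
        refine ⟨by simp <;> omega, ?_⟩
        rw [if_pos (by constructor <;> omega)]
        show cs.getD (k - 5) '.' = cs.getD (-5 + (k : Int)).toNat '.'
        congr 1
        omega
      · rw [getD_append_ge _ _ _ (by rw [List.length_append, h5L]; omega),
            List.length_append, h5L, hblen,
            marginR_getD _ (k - (5 + cs.length)) (by omega)]
        refine ⟨by simp <;> omega, ?_⟩
        rw [if_neg (by omega)]
  · intro k hk hedge
    rw [hlen] at hk hedge
    rcases hedge with hlo | hhi
    · rw [getD_append_lt _ _ _ (by rw [List.length_append, h5L]; omega),
          getD_append_lt _ _ _ (by omega), marginL_getD 0 k (by omega)]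
    · rw [getD_append_ge _ _ _ (by rw [List.length_append, h5L]; omega),
          List.length_append, h5L, hblen,
          marginR_getD _ (k - (5 + cs.length)) (by omega)]
  · intro i hi
    rw [hd0, dInit_getD] at hi
    rw [hlen]
    by_cases hr : 0 ≤ i ∧ i < (cs.length : Int)
    · constructor <;> omega
    · rw [if_neg hr] at hi; exact absurd rfl hi
  · rw [hd0, PySem.List.foldl_ite_eq_foldl_filter]
    exact PySem.Dict.nodup_keys_foldl_insert_key _ (fun pr : Int × Char => pr.1) (fun _ pr => pr.2) _
      (by simp [PySem.Dict.empty, PySem.Dict.keys])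

set_option maxHeartbeats 1000000 in
theorem loop_inv : ∀ (n : Nat) (d : PySem.Dict Int Char) (b : Int) (pots : List APot),
    PlantInv d b pots → ∃ b', PlantInv (bLoop n d) b' (aLoop n pots) := by
  intro n
  induction n with
  | zero => intro d b pots h; exact ⟨b, h⟩
  | succ n ih =>
    intro d b pots h
    simp only [bLoop, aLoop]
    exact ih (bStep d) (b - 5) (genStep pots) (genStep_inv h)

theorem getD_hash_iff (d : PySem.Dict Int Char) (i : Int) :
    d.getD i '.' = '#' ↔ d.get? i = some '#' := by
  rw [PySem.Dict.getD_eq_get?_getD]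
  cases h : d.get? i <;> simp

theorem sum_eq {d : PySem.Dict Int Char} {b : Int} {pots : List APot}
    (h : PlantInv d b pots) :
    pots.foldl (fun acc p => if p.content = '#' then acc + p.points else acc) 0
    = ((d.items.filter (fun p => p.2 = '#')).map (fun p => p.1)).sum := by
  obtain ⟨h10, hpt, -, hbd, hnd⟩ := h
  rw [PySem.List.foldl_ite_eq_foldl_filter (p := fun p : APot => p.content = '#')
        (f := fun acc p => acc + p.points),
      PySem.List.foldl_add (g := fun p : APot => p.points), zero_add]
  apply List.Perm.sum_eq
  have hmapPts : pots.map (fun p => p.points) = PySem.List.pyRange b (b + pots.length) 1 := by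
    apply List.ext_getElem
    · rw [List.length_map, PySem.List.length_pyRange_one]; omega
    · intro k h1 h2
      rw [List.getElem_map, PySem.List.getElem_pyRange_one]
      have := (hpt k (by simpa using h1)).1
      rw [List.getD_eq_getElem _ _ (by simpa using h1)] at this
      exact this
  have hnd1 : ((pots.filter (fun p => decide (p.content = '#'))).map (fun p => p.points)).Nodup := by
    have hsub : ((pots.filter (fun p => decide (p.content = '#'))).map (fun p => p.points)).Sublist
        (pots.map (fun p => p.points)) := List.filter_sublist.map _
    exact (hmapPts ▸ hsub).nodup (PySem.List.nodup_pyRange_one b (b + pots.length))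
  have hnd2 : ((d.items.filter (fun p => p.2 = '#')).map (fun p => p.1)).Nodup := by
    have hsub : ((d.items.filter (fun p => decide (p.2 = '#'))).map (fun p => p.1)).Sublist
        (d.items.map (fun p => p.1)) := List.filter_sublist.map _
    exact hsub.nodup hnd
  rw [List.perm_ext_iff_of_nodup hnd1 hnd2]
  intro i
  constructor
  · intro hi
    obtain ⟨p, hp, hpi⟩ := List.mem_map.mp hi
    obtain ⟨hpmem, hpc⟩ := List.mem_filter.mp hp
    obtain ⟨k, hk, hpk⟩ := List.mem_iff_getElem.mp hpmem
    have hptk := hpt k hk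
    rw [List.getD_eq_getElem _ _ hk, hpk] at hptk
    have hσ : d.getD i '.' = '#' := by
      have hib : i = b + (k : Int) := by rw [← hpi, hptk.1]
      rw [hib, ← hptk.2]
      simpa using hpc
    refine List.mem_map.mpr ⟨(i, '#'), List.mem_filter.mpr ⟨?_, by simp⟩, rfl⟩
    exact PySem.Dict.mem_items_of_get?_eq_some d ((getD_hash_iff d i).mp hσ)
  · intro hi
    obtain ⟨pr, hpr, hpri⟩ := List.mem_map.mp hi
    obtain ⟨hprmem, hprc⟩ := List.mem_filter.mp hpr
    have hget : d.get? pr.1 = some pr.2 := PySem.Dict.get?_of_mem_items d hprmem hnd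
    have hσ : d.getD i '.' = '#' := by
      rw [← hpri, PySem.Dict.getD_eq_get?_getD, hget]
      simpa using hprc
    have hib := hbd i (by rw [hσ]; decide)
    have hkk : ((i - b).toNat : Int) = i - b := by omega
    have hklt : (i - b).toNat < pots.length := by omega
    refine List.mem_map.mpr ⟨pots[(i - b).toNat], List.mem_filter.mpr ⟨List.getElem_mem _, ?_⟩, ?_⟩
    · have := (hpt (i - b).toNat hklt).2
      rw [List.getD_eq_getElem _ _ hklt] at this
      simp only [this]
      rw [show b + ((i - b).toNat : Int) = i by omega, hσ]
      simp
    · have := (hpt (i - b).toNat hklt).1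
      rw [List.getD_eq_getElem _ _ hklt] at this
      rw [this]
      omega

theorem get_plant_sum_eq (s : String) (g : Int) :
    get_plant_sum s g = get_plant_sum_alt s g := by
  simp only [get_plant_sum, get_plant_sum_alt]
  rw [addMargin_neg_eq, List.append_nil, buildFold, addMargin_pos_eq]
  obtain ⟨b', hinv⟩ := loop_inv g.toNat _ (-5) _ (init_inv s.toList)
  exact sum_eq hinv

-- ===== VERDICT (by name: the statement is the Claim_ definition above) =====
theorem get_plant_sum_spec : Claim_equal_get_plant_sum := by
  intro initial_state generations _
  exact get_plant_sum_eq initial_state generations
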